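-- pv_equiv track=rewrite | github.com/PorcoRosso85/home | bin/src/search/fts_kuzu/domain.py | create_highlight_info
-- ===== SOURCE A (Python) =====
-- from typing import List, Optional, Tuple
--
-- def create_highlight_info(
--     text: str,
--     keyword: str
-- ) -> Tuple[List[str], List[Tuple[int, int]]]:
--     """
--     テキスト内のキーワード出現箇所のハイライト情報を生成する純粋関数
--
--     Args:
--         text: 検索対象テキスト
--         keyword: ハイライトするキーワード
--
--     Returns:
--         (ハイライトテキストのリスト, 位置情報のリスト)のタプル
--     """
--     text_lower = text.lower()
--     keyword_lower = keyword.lower()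
--     highlights = []
--     positions = []
--
--     start = 0
--     while True:
--         pos = text_lower.find(keyword_lower, start)
--         if pos == -1:
--             break
--
--         # ハイライト部分を抽出
--         highlight_start = max(0, pos - 20)
--         highlight_end = min(len(text), pos + len(keyword) + 20)
--         highlight = text[highlight_start:highlight_end]
--
--         highlights.append(highlight)
--         positions.append((pos, pos + len(keyword)))
--
--         start = pos + 1
--
--     return highlights, positions
-- ===== SOURCE B (Python) =====
-- def create_highlight_info(text, keyword):
--     """B: single linear index scan with startswith instead of repeated find calls;
--     matches are collected once, then highlights and positions are derived by comprehensions."""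
--     text_lower = text.lower()
--     keyword_lower = keyword.lower()
--     n = len(text)
--     k = len(keyword)
--     matches = [i for i in range(n + 1) if text_lower.startswith(keyword_lower, i)]
--     highlights = [text[max(0, i - 20):min(n, i + k + 20)] for i in matches]
--     positions = [(i, i + k) for i in matches]
--     return highlights, positions
-- ===== Notes on version B (the rewrite author's own statement) =====
-- stated objective: alternative
-- what changed: Replaces the while-loop of repeated text.find(keyword, start) calls by one linear scan over all candidate start indices 0..len(text) testing startswith at each, collecting the match indices once and deriving highlights and positions from them by comprehensions.
import Mathlib
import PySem

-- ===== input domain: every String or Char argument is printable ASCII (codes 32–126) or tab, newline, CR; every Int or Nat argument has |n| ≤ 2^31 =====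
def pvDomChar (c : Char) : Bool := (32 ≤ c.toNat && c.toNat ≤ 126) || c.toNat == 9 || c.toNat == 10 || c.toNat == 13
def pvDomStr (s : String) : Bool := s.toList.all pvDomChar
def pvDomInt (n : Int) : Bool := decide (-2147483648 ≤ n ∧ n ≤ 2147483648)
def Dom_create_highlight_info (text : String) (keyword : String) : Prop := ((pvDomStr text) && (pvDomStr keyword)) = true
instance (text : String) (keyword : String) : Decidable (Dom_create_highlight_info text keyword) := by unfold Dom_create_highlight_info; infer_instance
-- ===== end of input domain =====

-- B replaces A's repeated find(keyword, start) loop by one linear scan of all candidate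
-- start indices with startswith; same results, proved equal on all inputs (alternative decomposition).


-- ===== PORT A =====
-- A's `while True: pos = text_lower.find(keyword_lower, start); ...; start = pos + 1` loop;
-- fuel (length + 2) only makes the recursion total — it is never exhausted (each match index is
-- a distinct value in 0..len, so there are at most len+1 iterations before find returns -1).
def chiLoop (t tl kl : List Char) (klen : Int) (start fuel : Nat) :
    List String × (List (Int × Int)) :=
  match fuel with
  | 0 => ([], [])
  | fuel + 1 =>
    let pos := PySem.Chars.findFrom tl kl (start : Int)
    if pos = -1 then ([], [])
    else
      let rest := chiLoop t tl kl klen (pos.toNat + 1) fuel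
      (String.ofList (PySem.List.slice t (some (max 0 (pos - 20)))
          (some (min ((t.length : Int)) (pos + klen + 20)))) :: rest.1,
       (pos, pos + klen) :: rest.2)

def create_highlight_info (text : String) (keyword : String) : List String × (List (Int × Int)) :=
  let t := text.toList
  let tl := PySem.Chars.lower t            -- text.lower()
  let kl := PySem.Chars.lower keyword.toList   -- keyword.lower()
  chiLoop t tl kl (keyword.toList.length : Int) 0 (tl.length + 2)

-- ===== PORT B =====
-- `text_lower.startswith(keyword_lower, i)` for 0 ≤ i ≤ len is exactly
-- `startswith (tl.drop i) kl` (exact on that range, the only one Source B uses).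
def create_highlight_info_alt (text : String) (keyword : String) : List String × (List (Int × Int)) :=
  let t := text.toList
  let tl := PySem.Chars.lower t
  let kl := PySem.Chars.lower keyword.toList
  let n : Int := (t.length : Int)
  let k : Int := (keyword.toList.length : Int)
  let ms := (PySem.List.pyRange 0 (n + 1)).filter
      (fun i => PySem.Chars.startswith (tl.drop i.toNat) kl)
  (ms.map (fun i => String.ofList (PySem.List.slice t (some (max 0 (i - 20)))
      (some (min n (i + k + 20))))),
   ms.map (fun i => (i, i + k)))

-- ===== PRECONDITION & SPEC =====
def Spec_create_highlight_info (text : String) (keyword : String) (out : List String × (List (Int × Int))) : Prop := out = create_highlight_info_alt text keyword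
instance (text : String) (keyword : String) (out : List String × (List (Int × Int))) : Decidable (Spec_create_highlight_info text keyword out) := by unfold Spec_create_highlight_info; infer_instance

-- ===== CLAIM (what is proved, stated in full; the proofs are below) =====
def Claim_equal_create_highlight_info : Prop := ∀ (text : String) (keyword : String), Dom_create_highlight_info text keyword → Spec_create_highlight_info text keyword (create_highlight_info text keyword)

-- ===== LEMMAS AND PROOFS =====

-- the common value of both ports, parameterised by the loop's start index
def chiSpec (t tl kl : List Char) (klen : Int) (start : Int) :
    List String × (List (Int × Int)) :=
  let ms := (PySem.List.pyRange start ((t.length : Int) + 1)).filter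
      (fun i => PySem.Chars.startswith (tl.drop i.toNat) kl)
  (ms.map (fun i => String.ofList (PySem.List.slice t (some (max 0 (i - 20)))
      (some (min ((t.length : Int)) (i + klen + 20))))),
   ms.map (fun i => (i, i + klen)))

lemma chiFindPastLen (tl kl : List Char) :
    PySem.Chars.findFrom tl kl ((tl.length : Int) + 1) = -1 := by
  simp [PySem.Chars.findFrom]; omega

-- no match anywhere in [start, len]  ⇒  the filter over the range is empty
lemma chiFilterNil (tl kl : List Char) (start : Nat) (b : Int)
    (h : ¬ kl <:+: tl.drop start) :
    (PySem.List.pyRange (start : Int) b).filter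
      (fun i => PySem.Chars.startswith (tl.drop i.toNat) kl) = [] := by
  rw [List.filter_eq_nil_iff]
  intro i hi
  have hm := PySem.List.mem_pyRange_one.mp hi
  simp only [Bool.not_eq_true]
  cases hsw : PySem.Chars.startswith (tl.drop i.toNat) kl
  · rfl
  · exfalso
    apply h
    rw [← PySem.Chars.isIn_iff_infix, ← PySem.Chars.exists_prefix_drop_iff_isIn]
    refine ⟨i.toNat - start, ?_⟩
    rw [List.drop_drop]
    have heq : start + (i.toNat - start) = i.toNat := by omega
    rw [heq]
    exact (PySem.Chars.startswith_iff _ _).mp hsw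

lemma chiLoop_eq (t tl kl : List Char) (klen : Int) (hn : tl.length = t.length)
    (fuel start : Nat) (hs : start ≤ t.length + 1) (hf : t.length + 2 - start ≤ fuel) :
    chiLoop t tl kl klen start fuel = chiSpec t tl kl klen (start : Int) := by
  induction fuel generalizing start with
  | zero => omega
  | succ fuel ih =>
    by_cases hend : start = t.length + 1
    · subst hend
      have hfind : PySem.Chars.findFrom tl kl ((t.length : Int) + 1) = -1 := by
        have h0 := chiFindPastLen tl kl
        rw [hn] at h0; exact h0
      simp [chiLoop, chiSpec, hfind,
        PySem.List.pyRange_one_eq_nil (le_refl ((t.length : Int) + 1))]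
    · have hsl : start ≤ tl.length := by omega
      by_cases hpos : PySem.Chars.findFrom tl kl (start : Int) = -1
      · have hno : ¬ kl <:+: tl.drop start :=
          (PySem.Chars.findFrom_natCast_eq_neg_one_iff tl kl start hsl).mp hpos
        simp [chiLoop, chiSpec, hpos, chiFilterNil tl kl start _ hno]
      · obtain ⟨hk, hpre, hmin⟩ := PySem.Chars.findFrom_natCast_spec tl kl start hsl hpos
        set pos := PySem.Chars.findFrom tl kl (start : Int) with hposdef
        have hposnn : 0 ≤ pos := le_trans (by positivity) hk
        have hple : pos ≤ (tl.length : Int) := by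
          rw [hposdef, PySem.Chars.findFrom_natCast tl kl start hsl]
          have h1 := PySem.Chars.find_le_length (tl.drop start) kl
          rw [List.length_drop] at h1
          split
          · omega
          · omega
        have hpcast : ((pos.toNat : Nat) : Int) = pos := Int.toNat_of_nonneg hposnn
        -- split the range at pos, then peel pos off
        have hsplit : PySem.List.pyRange (start : Int) ((t.length : Int) + 1)
            = PySem.List.pyRange (start : Int) pos
              ++ pos :: PySem.List.pyRange (pos + 1) ((t.length : Int) + 1) := by
          rw [PySem.List.pyRange_one_append (start : Int) pos ((t.length : Int) + 1)
                hk (by omega),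
              PySem.List.pyRange_one_cons (by omega : pos < (t.length : Int) + 1)]
        have hfilterlow : (PySem.List.pyRange (start : Int) pos).filter
            (fun i => PySem.Chars.startswith (tl.drop i.toNat) kl) = [] := by
          rw [List.filter_eq_nil_iff]
          intro i hi
          have hm := PySem.List.mem_pyRange_one.mp hi
          simp only [Bool.not_eq_true]
          cases hsw : PySem.Chars.startswith (tl.drop i.toNat) kl
          · rfl
          · exfalso
            exact hmin i.toNat (by omega) (by omega)
              ((PySem.Chars.startswith_iff _ _).mp hsw)
        have hpredp : PySem.Chars.startswith (tl.drop pos.toNat) kl = true :=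
          (PySem.Chars.startswith_iff _ _).mpr hpre
        have hrest : chiLoop t tl kl klen (pos.toNat + 1) fuel
            = chiSpec t tl kl klen ((pos.toNat + 1 : Nat) : Int) :=
          ih (pos.toNat + 1) (by omega) (by omega)
        have hcast1 : ((pos.toNat + 1 : Nat) : Int) = pos + 1 := by push_cast [hpcast]; ring
        simp only [chiLoop]
        rw [← hposdef, if_neg hpos, hrest, hcast1]
        simp only [chiSpec, hsplit, List.filter_append, hfilterlow, List.nil_append,
          List.filter_cons, hpredp, if_pos, List.map_cons]

-- ===== VERDICT (by name: the statement is the Claim_ definition above) =====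
theorem create_highlight_info_spec : Claim_equal_create_highlight_info := by
  intro text keyword _
  unfold Spec_create_highlight_info create_highlight_info create_highlight_info_alt
  have hn : (PySem.Chars.lower text.toList).length = text.toList.length := by
    simp [PySem.Chars.lower]
  rw [chiLoop_eq _ _ _ _ hn _ 0 (by omega) (by omega)]
  rfl
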